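-- pv_equiv track=rewrite | github.com/sam-sharps/Financial-Analysis | Personal Taxes/Tax Calculation.py | bracketsToAmounts
-- ===== SOURCE A (Python) =====
-- def bracketsToAmounts(brackets):
--     amounts = []
--     prevAmount = 0
--     for bracket in brackets:
--         amount = bracket[0]
--         percent = bracket[1]
--
--         amounts.append(
--             (amount-prevAmount, percent)
--         )
--         prevAmount = amount
--     return amounts
-- ===== SOURCE B (Python) =====
-- def bracketsToAmounts(brackets):
--     rev = []
--     for i in range(len(brackets) - 1, -1, -1):
--         prev = brackets[i - 1][0] if i > 0 else 0
--         rev.append((brackets[i][0] - prev, brackets[i][1]))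
--     return rev[::-1]
-- ===== Notes on version B (the rewrite author's own statement) =====
-- stated objective: alternative
-- what changed: Instead of a forward pass threading a prevAmount accumulator, B walks the indices back-to-front, reads each previous threshold directly by index (brackets[i-1][0]), builds the output reversed and flips it at the end.
import Mathlib
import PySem

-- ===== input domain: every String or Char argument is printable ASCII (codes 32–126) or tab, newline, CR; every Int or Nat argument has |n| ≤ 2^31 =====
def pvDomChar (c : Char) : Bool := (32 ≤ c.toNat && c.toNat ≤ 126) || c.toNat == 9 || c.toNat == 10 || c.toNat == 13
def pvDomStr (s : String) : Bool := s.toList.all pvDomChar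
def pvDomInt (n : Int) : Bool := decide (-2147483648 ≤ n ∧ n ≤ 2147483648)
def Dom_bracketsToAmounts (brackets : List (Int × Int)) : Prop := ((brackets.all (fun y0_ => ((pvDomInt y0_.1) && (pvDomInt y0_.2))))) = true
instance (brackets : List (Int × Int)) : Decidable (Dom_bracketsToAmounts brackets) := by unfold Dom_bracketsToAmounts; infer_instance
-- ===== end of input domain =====

-- B replaces A's forward pass threading a prevAmount accumulator by a back-to-front
-- index loop reading the previous threshold directly, reversed at the end (objective: alternative).

-- ===== PORT A =====
def bracketsToAmounts (brackets : List (Int × Int)) : List (Int × Int) :=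
  (brackets.foldl
    (fun (st : List (Int × Int) × Int) bracket =>
      let amount := bracket.1
      let percent := bracket.2
      (st.1 ++ [(amount - st.2, percent)], amount))
    ([], 0)).1

-- ===== PORT B =====
-- indices produced by range(len-1, -1, -1) are always in range, so pyGetD's default is never read
def bracketsToAmounts_alt (brackets : List (Int × Int)) : List (Int × Int) :=
  let rev := (PySem.List.pyRange ((brackets.length : Int) - 1) (-1) (-1)).foldl
    (fun rev i =>
      let prev := if 0 < i then (PySem.List.pyGetD brackets (i - 1) (0, 0)).1 else 0
      rev ++ [((PySem.List.pyGetD brackets i (0, 0)).1 - prev,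
               (PySem.List.pyGetD brackets i (0, 0)).2)]) []
  rev.reverse

-- ===== PRECONDITION & SPEC =====
def Spec_bracketsToAmounts (brackets : List (Int × Int)) (out : List (Int × Int)) : Prop := out = bracketsToAmounts_alt brackets
instance (brackets : List (Int × Int)) (out : List (Int × Int)) : Decidable (Spec_bracketsToAmounts brackets out) := by unfold Spec_bracketsToAmounts; infer_instance

-- ===== CLAIM (what is proved, stated in full; the proofs are below) =====
def Claim_equal_bracketsToAmounts : Prop := ∀ (brackets : List (Int × Int)), Dom_bracketsToAmounts brackets → Spec_bracketsToAmounts brackets (bracketsToAmounts brackets)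

-- ===== LEMMAS AND PROOFS =====
-- common reference function: successive differences with explicit previous threshold
def btaRef (p : Int) : List (Int × Int) → List (Int × Int)
  | [] => []
  | (a, q) :: rest => (a - p, q) :: btaRef a rest

lemma bta_A_fold : ∀ (bs : List (Int × Int)) (acc : List (Int × Int)) (p : Int),
    (bs.foldl
      (fun (st : List (Int × Int) × Int) bracket =>
        let amount := bracket.1
        let percent := bracket.2
        (st.1 ++ [(amount - st.2, percent)], amount))
      (acc, p)).1 = acc ++ btaRef p bs := by
  intro bs
  induction bs with
  | nil => intro acc p; simp [btaRef]
  | cons b bs ih =>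
    intro acc p
    obtain ⟨a, q⟩ := b
    rw [List.foldl_cons, ih]
    simp [btaRef]

lemma pyGetD_cons_shift {α : Type} (x : α) (bs : List α) (i : Int) (hi : 0 ≤ i) (d : α) :
    PySem.List.pyGetD (x :: bs) (i + 1) d = PySem.List.pyGetD bs i d := by
  obtain ⟨k, rfl⟩ := Int.eq_ofNat_of_zero_le hi
  have h : ((k : Int) + 1) = ((k + 1 : Nat) : Int) := by push_cast; ring
  rw [h, PySem.List.pyGetD_natCast, PySem.List.pyGetD_natCast]
  simp

lemma bta_B_map : ∀ (bs : List (Int × Int)) (p : Int),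
    (List.range bs.length).map (fun (k : Nat) =>
      ((PySem.List.pyGetD bs (k : Int) (0, 0)).1 -
        (if 0 < (k : Int) then (PySem.List.pyGetD bs ((k : Int) - 1) (0, 0)).1 else p),
       (PySem.List.pyGetD bs (k : Int) (0, 0)).2)) = btaRef p bs := by
  intro bs
  induction bs with
  | nil => intro p; simp [btaRef]
  | cons b bs ih =>
    intro p
    obtain ⟨a, q⟩ := b
    rw [List.length_cons, List.range_succ_eq_map, List.map_cons, List.map_map]
    simp only [btaRef]
    refine List.cons_eq_cons.mpr ⟨?_, ?_⟩
    · simp [PySem.List.pyGetD]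
    · rw [← ih a]
      apply List.map_congr_left
      intro k hk
      have hk0 : (0 : Int) < (k : Int) + 1 := by positivity
      have h1 : ((k + 1 : Nat) : Int) = (k : Int) + 1 := by push_cast; ring
      simp only [Function.comp_apply, h1, hk0, if_pos]
      have h2 : ((k : Int) + 1 - 1) = (k : Int) := by ring
      rw [h2, pyGetD_cons_shift (a, q) bs (k : Int) (by positivity) (0, 0)]
      by_cases hz : 0 < (k : Int)
      · obtain ⟨m, rfl⟩ : ∃ m : Nat, k = m + 1 := by
          cases k with
          | zero => exact absurd hz (by simp)
          | succ m => exact ⟨m, rfl⟩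
        have h3 : ((m + 1 : Nat) : Int) = (m : Int) + 1 := by push_cast; ring
        rw [h3, pyGetD_cons_shift (a, q) bs (m : Int) (by positivity) (0, 0)]
        simp
      · have hk0' : k = 0 := by omega
        subst hk0'
        simp [PySem.List.pyGetD]

-- ===== VERDICT (by name: the statement is the Claim_ definition above) =====
theorem bracketsToAmounts_spec : Claim_equal_bracketsToAmounts := by
  intro brackets _
  unfold Spec_bracketsToAmounts bracketsToAmounts bracketsToAmounts_alt
  rw [bta_A_fold]
  have hr : PySem.List.pyRange ((brackets.length : Int) - 1) (-1) (-1)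
      = (PySem.List.pyRange 0 (brackets.length : Int) 1).reverse := by
    rw [PySem.List.pyRange_neg_one_eq_reverse]
    norm_num
  rw [hr, List.foldl_reverse]
  have hfold : ∀ (l : List Int) (init : List (Int × Int)),
      l.foldr (fun i rev =>
        rev ++ [((PySem.List.pyGetD brackets i (0, 0)).1 -
                  (if 0 < i then (PySem.List.pyGetD brackets (i - 1) (0, 0)).1 else 0),
                 (PySem.List.pyGetD brackets i (0, 0)).2)]) init
      = init ++ (l.reverse.map (fun i =>
          ((PySem.List.pyGetD brackets i (0, 0)).1 -
            (if 0 < i then (PySem.List.pyGetD brackets (i - 1) (0, 0)).1 else 0),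
           (PySem.List.pyGetD brackets i (0, 0)).2))) := by
    intro l
    induction l with
    | nil => intro init; simp
    | cons x xs ih => intro init; simp [ih, List.map_append]
  simp only [hfold]
  rw [List.nil_append, List.reverse_append, List.map_reverse, List.reverse_reverse,
      List.reverse_nil, List.append_nil]
  rw [PySem.List.pyRange_one]
  have hlen : ((brackets.length : Int) - 0).toNat = brackets.length := by omega
  rw [hlen, List.map_map]
  rw [← bta_B_map brackets 0]
  apply List.map_congr_left
  intro k hk
  simp
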